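-- pv_equiv track=rewrite | github.com/sungyujeon/problem-solving | others/kakao2020/1.py | getComp
-- ===== SOURCE A (Python) =====
-- def getComp(s, r):
--     n = len(s)
--     start = 0
--     end = r
--
--     total = n
--     cnt = 1
--     curr_s = ''
--
--     while (end <= n):
--         next_s = s[start:end]
--
--         if curr_s == next_s:
--             cnt += 1
--         else:
--             if (cnt != 1):
--                 _cnt = str(cnt)
--                 total += len(_cnt)
--             cnt = 1
--             curr_s = next_s
--
--         if (cnt != 1):
--             total -= r
--
--         start += r
--         end += r
--
--         if (cnt > 1 and end > n):
--             _cnt = str(cnt)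
--             total += len(_cnt)
--
--     return total
-- ===== SOURCE B (Python) =====
-- def getComp(s, r):
--     n = len(s)
--     k = n - n % r
--     chunks = [s[i:i + r] for i in range(0, k, r)]
--     out = []
--     i = 0
--     while i < len(chunks):
--         j = i
--         while j < len(chunks) and chunks[j] == chunks[i]:
--             j += 1
--         c = j - i
--         out.append((str(c) if c > 1 else "") + chunks[i])
--         i = j
--     out.append(s[k:])
--     return len("".join(out))
-- ===== Notes on version B (the rewrite author's own statement) =====
-- stated objective: alternative
-- what changed: A keeps a running total that it patches in place while scanning chunk indices (subtracting r per repeated chunk and splicing in digit counts); B actually slices the string into full r-sized chunks, run-length groups equal adjacent chunks, builds the compressed string (str(count)+chunk for runs longer than 1, plus the verbatim tail) and returns its length. Pre_ excludes r <= 0, where A's while loop never terminates (no return value to match); B raises ZeroDivisionError at r = 0 there.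
import Mathlib
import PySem

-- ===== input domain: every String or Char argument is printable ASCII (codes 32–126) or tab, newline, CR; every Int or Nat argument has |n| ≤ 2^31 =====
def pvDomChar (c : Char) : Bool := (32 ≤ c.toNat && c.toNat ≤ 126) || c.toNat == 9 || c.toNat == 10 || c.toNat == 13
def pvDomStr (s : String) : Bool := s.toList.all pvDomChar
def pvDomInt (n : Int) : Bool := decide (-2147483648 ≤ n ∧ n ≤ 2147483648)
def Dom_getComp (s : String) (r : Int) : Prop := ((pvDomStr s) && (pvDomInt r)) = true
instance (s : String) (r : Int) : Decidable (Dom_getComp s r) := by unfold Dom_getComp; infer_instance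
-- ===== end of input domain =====

-- B replaces A's running arithmetic adjustment of `total` by actually building the run-length
-- compressed string from r-sized chunks and measuring its length (objective: alternative decomposition, not faster).


-- ===== PORT A =====
-- the while loop; fuel only makes the definition total (with r ≥ 1 the loop runs at most n times
-- and the fuel n+1 never runs out; for r ≤ 0 Python never returns, which Pre_ excludes)
def pvLoopA (l : List Char) (n r : Int) : Nat → Int → Int → Int → Int → List Char → Int
  | 0, _, _, total, _, _ => total
  | fuel+1, start, end_, total, cnt, curr =>
    if end_ ≤ n then
      let next := PySem.List.slice l (some start) (some end_)
      let st : Int × Int × List Char :=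
        if curr == next then (total, cnt + 1, curr)
        else ((if cnt ≠ 1 then total + ((PySem.Int.toChars cnt).length : Int) else total), 1, next)
      let total₂ := if st.2.1 ≠ 1 then st.1 - r else st.1
      let start' := start + r
      let end' := end_ + r
      let total₃ := if 1 < st.2.1 ∧ n < end' then total₂ + ((PySem.Int.toChars st.2.1).length : Int) else total₂
      pvLoopA l n r fuel start' end' total₃ st.2.1 st.2.2
    else total


def getComp (s : String) (r : Int) : Int :=
  let l := s.toList
  let n : Int := (l.length : Int)
  pvLoopA l n r (l.length + 1) 0 r n 1 []

-- ===== PORT B =====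
-- run-length grouping of the chunk list: each group becomes str(count)+chunk (count omitted when 1)
def pvRuns : List (List Char) → List (List Char)
  | [] => []
  | c :: rest =>
    let cnt : Int := ((rest.takeWhile (fun x => x == c)).length : Int) + 1
    ((if 1 < cnt then PySem.Int.toChars cnt else []) ++ c) :: pvRuns (rest.dropWhile (fun x => x == c))
  termination_by cs => cs.length
  decreasing_by
    simp only [List.length_cons]
    exact Nat.lt_succ_of_le (List.length_dropWhile_le _ _)


def getComp_alt (s : String) (r : Int) : Int :=
  let l := s.toList
  let n : Int := (l.length : Int)
  let k := n - PySem.Int.mod n r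
  let chunks := (PySem.List.pyRange 0 k r).map (fun i => PySem.List.slice l (some i) (some (i + r)))
  let parts := pvRuns chunks ++ [PySem.List.slice l (some k) (some n)]
  (parts.flatten.length : Int)

-- ===== PRECONDITION & SPEC =====
-- Pre_ excludes only r ≤ 0: there A never returns (end is incremented by r ≤ 0 each pass of the
-- while loop, so `end <= n` never becomes false), so there is no return value to match.
def Pre_getComp (s : String) (r : Int) : Prop := 1 ≤ r
instance (s : String) (r : Int) : Decidable (Pre_getComp s r) := by unfold Pre_getComp; infer_instance
def pvWitness_getComp : String × Int := ("aabbaccc", 2)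

def Spec_getComp (s : String) (r : Int) (out : Int) : Prop := out = getComp_alt s r
instance (s : String) (r : Int) (out : Int) : Decidable (Spec_getComp s r out) := by unfold Spec_getComp; infer_instance

-- ===== CLAIM (what is proved, stated in full; the proofs are below) =====
def Claim_equal_getComp : Prop := ∀ (s : String) (r : Int), Dom_getComp s r → Pre_getComp s r → Spec_getComp s r (getComp s r)

-- ===== LEMMAS AND PROOFS =====

-- chunk list starting at index `start` (at start = 0 it is B's chunk list, definitionally)
def pvChunksFrom (l : List Char) (r k start : Int) : List (List Char) :=
  (PySem.List.pyRange start k r).map (fun i => PySem.List.slice l (some i) (some (i + r)))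


-- A's loop body re-expressed as structural recursion on the chunk list (proof device)
def pvFoldA (r : Int) : List (List Char) → Int → Int → List Char → Int
  | [], total, _, _ => total
  | c :: cs, total, cnt, curr =>
    let st : Int × Int × List Char :=
      if curr == c then (total, cnt + 1, curr)
      else ((if cnt ≠ 1 then total + ((PySem.Int.toChars cnt).length : Int) else total), 1, c)
    let total₂ := if st.2.1 ≠ 1 then st.1 - r else st.1
    let total₃ := if 1 < st.2.1 ∧ cs = [] then total₂ + ((PySem.Int.toChars st.2.1).length : Int) else total₂
    pvFoldA r cs total₃ st.2.1 st.2.2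


-- net contribution of a fresh chunk list to A's total: per run, digits(count) when count > 1, minus r per repeat
def pvCompA (r : Int) : List (List Char) → Int
  | [] => 0
  | c :: rest =>
    let m : Int := ((rest.takeWhile (fun x => x == c)).length : Int)
    (if 1 < m + 1 then ((PySem.Int.toChars (m + 1)).length : Int) else 0) - r * m
      + pvCompA r (rest.dropWhile (fun x => x == c))
  termination_by cs => cs.length
  decreasing_by
    simp only [List.length_cons]
    exact Nat.lt_succ_of_le (List.length_dropWhile_le _ _)


lemma pyRange_pos_nil {a b r : Int} (hr : 0 < r) (h : b ≤ a) : PySem.List.pyRange a b r = [] := by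
  rw [PySem.List.pyRange_of_pos _ _ hr]
  simp [show ¬ a < b by omega]

lemma pyRange_pos_cons {a b r : Int} (hr : 0 < r) (h : a < b) :
    PySem.List.pyRange a b r = a :: PySem.List.pyRange (a+r) b r := by
  rw [PySem.List.pyRange_of_pos _ _ hr, PySem.List.pyRange_of_pos _ _ hr]
  have hcount : ((b - a + r - 1) / r) = ((b - (a+r) + r - 1) / r) + 1 := by
    have : b - a + r - 1 = (b - (a+r) + r - 1) + 1 * r := by ring
    rw [this, Int.add_mul_ediv_right _ _ (by omega)]
  by_cases h2 : a + r < b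
  · simp only [if_pos h, if_pos h2, hcount]
    have hnn : 0 ≤ (b - (a+r) + r - 1) / r := Int.ediv_nonneg (by omega) (by omega)
    rw [show ((b - (a+r) + r - 1) / r + 1).toNat = ((b - (a+r) + r - 1) / r).toNat + 1 by omega]
    rw [List.range_succ_eq_map]
    simp only [List.map_cons, List.map_map]
    congr 1
    · simp
    · apply List.map_congr_left
      intro k _
      simp [Function.comp]
      ring
  · have hc2 : (b - (a+r) + r - 1) / r = 0 := by
      apply Int.ediv_eq_zero_of_lt <;> omega
    simp only [if_pos h, if_neg h2, hcount, hc2]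
    norm_num

lemma dvd_le_of_lt_add {r x y : Int} (hr : 0 < r) (hx : r ∣ x) (hy : r ∣ y) (h : x < y + r) : x ≤ y := by
  by_contra hc
  have hd : r ∣ (x - y) := dvd_sub hx hy
  have : r ≤ x - y := Int.le_of_dvd (by omega) hd
  omega


-- stage 1: the fueled index loop equals the fold over the remaining chunk list
lemma loopA_eq_foldA (l : List Char) (r : Int) (hr : 1 ≤ r) (k : Int)
    (hk0 : 0 ≤ k) (hkn : k ≤ (l.length : Int)) (hkd : r ∣ k)
    (hmax : ∀ m : Int, r ∣ m → m ≤ (l.length : Int) → m ≤ k) :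
    ∀ (fuel : Nat) (start total cnt : Int) (curr : List Char),
      r ∣ start → ((l.length : Int) - start).toNat < fuel →
      pvLoopA l (l.length : Int) r fuel start (start + r) total cnt curr
        = pvFoldA r (pvChunksFrom l r k start) total cnt curr := by
  intro fuel
  induction fuel with
  | zero => intro start total cnt curr _ hf; omega
  | succ f ih =>
    intro start total cnt curr hds hf
    have hnk : (l.length : Int) < k + r := by
      by_contra hc
      have := hmax (k + r) (by exact Dvd.dvd.add hkd ⟨1, by ring⟩) (by omega)
      omega
    by_cases hle : start + r ≤ (l.length : Int)
    · have hsk : start < k := by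
        have := hmax (start + r) (Dvd.dvd.add hds ⟨1, by ring⟩) hle
        omega
      have hbump : ((l.length : Int) < start + r + r) ↔ (pvChunksFrom l r k (start + r) = []) := by
        constructor
        · intro h
          have hk1 : k ≤ start + r :=
            dvd_le_of_lt_add (by omega) hkd (Dvd.dvd.add hds ⟨1, by ring⟩) (by omega)
          simp [pvChunksFrom, pyRange_pos_nil (by omega : (0:Int) < r) hk1]
        · intro h
          by_contra hc
          have h2 : start + r < k := by
            rcases lt_or_ge (start + r) k with h' | h'
            · exact h'
            · exfalso; omega
          simp [pvChunksFrom, pyRange_pos_cons (by omega : (0:Int) < r) h2] at h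
      rw [pvLoopA]
      simp only [if_pos hle]
      rw [pvChunksFrom, pyRange_pos_cons (by omega : (0:Int) < r) hsk, List.map_cons]
      rw [pvFoldA]
      rw [← pvChunksFrom]
      simp only [hbump]
      rw [show start + r + r = (start + r) + r by ring]
      exact ih (start + r) _ _ _ (Dvd.dvd.add hds ⟨1, by ring⟩) (by omega)
    · have hks : k ≤ start := dvd_le_of_lt_add (by omega) hkd hds (by omega)
      rw [pvLoopA]
      simp only [if_neg hle]
      simp [pvChunksFrom, pyRange_pos_nil (by omega : (0:Int) < r) hks, pvFoldA]


-- stage 2: pvFoldA closes the open run (curr, cnt) and then contributes pvCompA of the rest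
set_option maxHeartbeats 1000000 in
lemma foldA_run (r : Int) :
    ∀ (cs : List (List Char)) (c : List Char) (total cnt : Int) (curr : List Char), 1 ≤ cnt →
      pvFoldA r (c :: cs) total cnt curr
        = total - r * (((c :: cs).takeWhile (fun x => x == curr)).length : Int)
          + (if 1 < cnt + (((c :: cs).takeWhile (fun x => x == curr)).length : Int)
             then ((PySem.Int.toChars (cnt + (((c :: cs).takeWhile (fun x => x == curr)).length : Int))).length : Int)
             else 0)
          + pvCompA r ((c :: cs).dropWhile (fun x => x == curr)) := by
  intro cs
  induction cs with
  | nil =>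
    intro c total cnt curr hcnt
    rw [pvFoldA, pvFoldA]
    by_cases h : curr = c
    · have hb : (c == curr) = true := by simp [h]
      have hb2 : (curr == c) = true := by simp [h]
      simp only [List.takeWhile_cons, List.dropWhile_cons, hb, hb2, if_true, List.takeWhile_nil,
        List.dropWhile_nil, List.length_cons, List.length_nil]
      have h1 : cnt + 1 ≠ 1 := by omega
      have h2 : 1 < cnt + 1 := by omega
      simp [pvCompA, h1, h2]
      all_goals (push_cast; ring_nf)
    · have hb : (c == curr) = false := by simp [Ne.symm h]
      have hb2 : (curr == c) = false := by simp [h]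
      simp only [List.takeWhile_cons, List.dropWhile_cons, hb, hb2, if_false, List.length_nil,
        Bool.false_eq_true]
      simp [pvCompA]
      split_ifs <;> omega
  | cons c' cs'' ih =>
    intro c total cnt curr hcnt
    rw [pvFoldA]
    by_cases h : curr = c
    · have hb : (c == curr) = true := by simp [h]
      have hb2 : (curr == c) = true := by simp [h]
      have ht : List.takeWhile (fun x => x == curr) (c :: c' :: cs'')
          = c :: List.takeWhile (fun x => x == curr) (c' :: cs'') := by
        rw [List.takeWhile_cons]; simp [hb]
      have hd : List.dropWhile (fun x => x == curr) (c :: c' :: cs'')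
          = List.dropWhile (fun x => x == curr) (c' :: cs'') := by
        rw [List.dropWhile_cons]; simp [hb]
      rw [ht, hd]
      have h1 : cnt + 1 ≠ 1 := by omega
      simp only [hb2, h1, List.length_cons, if_true, ite_true, ne_eq, not_false_iff,
        reduceCtorEq, and_false, if_false]
      rw [ih c' (total - r) (cnt + 1) curr (by omega)]
      push_cast
      ring_nf
    · have hb : (c == curr) = false := by simp [Ne.symm h]
      have hb2 : (curr == c) = false := by simp [h]
      have ht : List.takeWhile (fun x => x == curr) (c :: c' :: cs'') = [] := by
        rw [List.takeWhile_cons]; simp [hb]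
      have hd : List.dropWhile (fun x => x == curr) (c :: c' :: cs'')
          = c :: c' :: cs'' := by
        rw [List.dropWhile_cons]; simp [hb]
      rw [ht, hd]
      simp only [hb2, Bool.false_eq_true, if_false, ne_eq, List.length_nil, and_self, false_and,
        and_false]
      norm_num
      rw [ih c' _ 1 c (by omega)]
      rw [pvCompA]
      rw [show (1:Int) + ((List.takeWhile (fun x => x == c) (c' :: cs'')).length : Int)
            = ((List.takeWhile (fun x => x == c) (c' :: cs'')).length : Int) + 1 from by ring]
      push_cast
      by_cases hc : cnt = 1
      · subst hc
        norm_num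
        split_ifs <;> (first | ring | omega | (exfalso; omega))
      · have h2 : 1 < cnt := by omega
        split_ifs <;> (first | ring | omega | (exfalso; omega))

-- B side: total length of the grouped parts, when every chunk has length w
lemma runs_flatten_length (w : Nat) :
    ∀ (n : Nat) (cs : List (List Char)), cs.length ≤ n → (∀ c ∈ cs, c.length = w) →
      (((pvRuns cs).flatten.length : Int)) = pvCompA (w : Int) cs + (w : Int) * (cs.length : Int) := by
  intro n
  induction n with
  | zero =>
    intro cs hlen _
    have : cs = [] := List.eq_nil_of_length_eq_zero (by omega)
    subst this
    simp [pvRuns, pvCompA]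
  | succ n' ih =>
    intro cs hlen hw
    match cs with
    | [] => simp [pvRuns, pvCompA]
    | c :: rest =>
      rw [pvRuns, pvCompA]
      have hsplit : (List.takeWhile (fun x => x == c) rest).length
          + (List.dropWhile (fun x => x == c) rest).length = rest.length := by
        rw [← List.length_append, List.takeWhile_append_dropWhile]
      have hdroplen : (List.dropWhile (fun x => x == c) rest).length ≤ n' := by
        simp at hlen; omega
      have hdropmem : ∀ x ∈ List.dropWhile (fun x => x == c) rest, x.length = w := by
        intro x hx
        exact hw x (List.mem_cons_of_mem _ ((List.dropWhile_sublist _).mem hx))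
      rw [List.flatten_cons]
      simp only [List.length_append, List.length_cons]
      push_cast
      rw [ih _ hdroplen hdropmem]
      have hc : c.length = w := hw c List.mem_cons_self
      rw [hc]
      have hs : ((List.takeWhile (fun x => x == c) rest).length : Int)
          + ((List.dropWhile (fun x => x == c) rest).length : Int) = (rest.length : Int) := by
        exact_mod_cast hsplit
      rw [apply_ite List.length, apply_ite (fun z : Nat => (z : Int))]
      simp only [List.length_nil, Nat.cast_zero]
      have hs2 : (w:Int) * (rest.length : Int)
          = (w:Int) * ((List.takeWhile (fun x => x == c) rest).length : Int)
            + (w:Int) * ((List.dropWhile (fun x => x == c) rest).length : Int) := by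
        rw [← hs]; ring
      split_ifs <;> push_cast <;> linarith [hs2]

lemma pv_main_eq (s : String) (r : Int) (hr : 1 ≤ r) : getComp s r = getComp_alt s r := by
  unfold getComp getComp_alt
  simp only []
  set l := s.toList with hl
  set n : Int := (l.length : Int) with hn
  set k : Int := n - PySem.Int.mod n r with hk
  have hrpos : (0:Int) < r := by omega
  have hmod1 : 0 ≤ PySem.Int.mod n r := PySem.Int.mod_nonneg _ hrpos
  have hmod2 : PySem.Int.mod n r < r := PySem.Int.mod_lt _ hrpos
  have hfd : PySem.Int.floordiv n r * r + PySem.Int.mod n r = n := PySem.Int.floordiv_mul_add_mod n r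
  have hkd : r ∣ k := ⟨PySem.Int.floordiv n r, by rw [mul_comm]; omega⟩
  have hn0 : 0 ≤ n := by positivity
  have hfd0 : 0 ≤ PySem.Int.floordiv n r := by
    rw [PySem.Int.floordiv_eq_ediv_of_pos hrpos]
    exact Int.ediv_nonneg hn0 (by omega)
  have hk0 : 0 ≤ k := by
    have : k = PySem.Int.floordiv n r * r := by omega
    rw [this]; positivity
  have hkn : k ≤ n := by omega
  have hmax : ∀ m : Int, r ∣ m → m ≤ n → m ≤ k := by
    intro m hdm hmn
    obtain ⟨p, hp⟩ := hdm
    have hple : p ≤ n / r := by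
      rw [Int.le_ediv_iff_mul_le hrpos, mul_comm]; omega
    have : r * p ≤ r * (n / r) := by
      exact mul_le_mul_of_nonneg_left hple (by omega)
    have hke : k = r * (n / r) := by
      rw [hk, ← PySem.Int.floordiv_eq_ediv_of_pos hrpos, mul_comm]; omega
    omega
  -- A side
  have hA : pvLoopA l n r (l.length + 1) 0 r n 1 []
      = pvFoldA r (pvChunksFrom l r k 0) n 1 [] := by
    have := loopA_eq_foldA l r hr k hk0 hkn hkd hmax (l.length + 1) 0 n 1 []
      (dvd_zero r) (by omega)
    rw [zero_add] at this
    exact this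
  -- chunk lengths
  have hchunklen : ∀ c ∈ pvChunksFrom l r k 0, c.length = r.toNat := by
    intro c hc
    rw [pvChunksFrom] at hc
    obtain ⟨i, hi, hci⟩ := List.mem_map.mp hc
    obtain ⟨hi0, hik, hidvd⟩ := (PySem.List.mem_pyRange_iff_of_pos hrpos i).mp hi
    rw [sub_zero] at hidvd
    have hirk : i + r ≤ k := by
      have := dvd_le_of_lt_add hrpos (Dvd.dvd.add hidvd ⟨1, by ring⟩) hkd (by omega)
      omega
    rw [← hci, PySem.List.slice_toNat _ hi0 (by omega)]
    simp only [List.length_take, List.length_drop]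
    omega
  -- total chunk footprint
  have hlenchunks : r * ((pvChunksFrom l r k 0).length : Int) = k := by
    rw [pvChunksFrom, List.length_map]
    rw [PySem.List.pyRange_of_pos _ _ hrpos]
    obtain ⟨p, hp⟩ := hkd
    by_cases hkpos : (0:Int) < k
    · simp only [if_pos (by omega : (0:Int) < k), List.length_map, List.length_range]
      have hp0 : 0 < p := by nlinarith
      have : (k - 0 + r - 1) / r = p := by
        rw [show k - 0 + r - 1 = (r - 1) + p * r by rw [mul_comm]; omega]
        rw [Int.add_mul_ediv_right _ _ (by omega)]
        rw [Int.ediv_eq_zero_of_lt (by omega) (by omega)]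
        omega
      rw [this]
      rw [Int.toNat_of_nonneg (by omega)] at *
      omega
    · have hk0' : k = 0 := by omega
      simp [hk0', show ¬ ((0:Int) < 0) by omega]
  -- B side
  have hB : (((pvRuns (pvChunksFrom l r k 0) ++ [PySem.List.slice l (some k) (some n)]).flatten.length : Nat) : Int)
      = pvCompA r (pvChunksFrom l r k 0) + n := by
    rw [List.flatten_append]
    simp only [List.flatten_cons, List.flatten_nil, List.append_nil, List.length_append]
    push_cast
    rw [runs_flatten_length r.toNat (pvChunksFrom l r k 0).length _ (le_refl _) hchunklen]
    have hrt : ((r.toNat : Nat) : Int) = r := Int.toNat_of_nonneg (by omega)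
    rw [hrt]
    have htail : ((PySem.List.slice l (some k) (some n)).length : Int) = n - k := by
      rw [PySem.List.slice_toNat _ hk0 hn0]
      simp only [List.length_take, List.length_drop]
      omega
    rw [htail, hlenchunks]
    ring
  rw [show (List.map (fun i => PySem.List.slice l (some i) (some (i + r))) (PySem.List.pyRange 0 k r)) = pvChunksFrom l r k 0 from rfl]
  rw [hA, hB]
  -- close with foldA_run
  match hch : pvChunksFrom l r k 0 with
  | [] => rw [pvFoldA]; simp [pvCompA]
  | c :: cs' =>
    have hcne : ¬ ((c == ([] : List Char)) = true) := by
      have : c.length = r.toNat := hchunklen c (by rw [hch]; exact List.mem_cons_self)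
      intro hb
      have : c = [] := by simpa using hb
      subst this
      simp at this ⊢
      omega
    rw [foldA_run r cs' c n 1 [] (by omega)]
    have ht : List.takeWhile (fun x => x == ([] : List Char)) (c :: cs') = [] := by
      rw [List.takeWhile_cons]
      simp only [if_neg hcne]
    have hd : List.dropWhile (fun x => x == ([] : List Char)) (c :: cs') = c :: cs' := by
      rw [List.dropWhile_cons]
      simp only [if_neg hcne]
    rw [ht, hd]
    norm_num
    ring


-- ===== VERDICT (by name: the statement is the Claim_ definition above) =====
theorem getComp_spec : Claim_equal_getComp := by
  intro s r _ hpre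
  unfold Spec_getComp
  exact pv_main_eq s r hpre
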